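-- pv_equiv track=rewrite | github.com/ElierRosales/holaBootcamp | A2.py | calcular_minimo_personas
-- ===== SOURCE A (Python) =====
-- def calcular_minimo_personas(secuencia):
--     max_personas = 0
--     personas_actuales = 0
--     for char in secuencia:
--         if char == '+':
--             personas_actuales += 1
--             max_personas = max(max_personas, personas_actuales)
--         elif char == '-':
--             personas_actuales -= 1
--     # Ajustamos personas_actuales para tener en cuenta las salidas que no tienen entradas registradas
--     return max(max_personas, 1)
-- ===== SOURCE B (Python) =====
-- def _go(s):
--     # (total delta, max prefix sum incl. empty prefix) of segment s, divide & conquer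
--     if len(s) == 0:
--         return (0, 0)
--     if len(s) == 1:
--         d = 1 if s == '+' else -1 if s == '-' else 0
--         return (d, max(0, d))
--     k = len(s) // 2
--     t1, b1 = _go(s[:k])
--     t2, b2 = _go(s[k:])
--     return (t1 + t2, max(b1, t1 + b2))
--
-- def calcular_minimo_personas(secuencia):
--     return max(1, _go(secuencia)[1])
-- ===== Notes on version B (the rewrite author's own statement) =====
-- stated objective: alternative
-- what changed: A maintains an online running count with a fused running maximum in one left-to-right loop; B computes the peak occupancy by divide and conquer, recursively splitting the string in half and combining each half's (total delta, best prefix sum) pair via (t1+t2, max(b1, t1+b2)), then flooring at 1.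
import Mathlib
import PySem

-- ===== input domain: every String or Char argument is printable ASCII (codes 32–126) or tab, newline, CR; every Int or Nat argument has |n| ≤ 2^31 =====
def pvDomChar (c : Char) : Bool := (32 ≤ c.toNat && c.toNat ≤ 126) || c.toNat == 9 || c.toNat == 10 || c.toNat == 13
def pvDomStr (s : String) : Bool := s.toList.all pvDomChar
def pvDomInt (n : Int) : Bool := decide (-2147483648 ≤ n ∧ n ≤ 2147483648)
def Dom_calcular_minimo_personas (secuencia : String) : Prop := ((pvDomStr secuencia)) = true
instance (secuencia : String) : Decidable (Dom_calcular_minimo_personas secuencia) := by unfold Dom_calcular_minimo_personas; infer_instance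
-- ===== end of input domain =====

-- B replaces A's fused online loop (count + running max) with a divide-and-conquer recursion combining (total, best-prefix) pairs of halves; floored at 1.


-- ===== PORT A =====
-- A's loop body: state = (max_personas, personas_actuales)
def pvStepA (st : Int × Int) (char : Char) : Int × Int :=
  if char = '+' then
    let pa := st.2 + 1
    (max st.1 pa, pa)
  else if char = '-' then (st.1, st.2 - 1)
  else st

def calcular_minimo_personas (secuencia : String) : Int :=
  let st := secuencia.toList.foldl pvStepA (0, 0)
  max st.1 1

-- ===== PORT B =====
-- _go: (total delta, max prefix sum incl. empty prefix) of the segment, by splitting in half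
def pvGo : List Char → Int × Int
  | [] => (0, 0)
  | [c] =>
    let d : Int := if c = '+' then 1 else if c = '-' then -1 else 0
    (d, max 0 d)
  | c1 :: c2 :: rest =>
    let l := c1 :: c2 :: rest
    let k := l.length / 2
    let p1 := pvGo (l.take k)
    let p2 := pvGo (l.drop k)
    (p1.1 + p2.1, max p1.2 (p1.1 + p2.2))
termination_by l => l.length
decreasing_by
  · simp [List.length_take]; omega
  · simp [List.length_drop]; omega

def calcular_minimo_personas_alt (secuencia : String) : Int :=
  max 1 (pvGo secuencia.toList).2

-- ===== PRECONDITION & SPEC =====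
def Spec_calcular_minimo_personas (secuencia : String) (out : Int) : Prop := out = calcular_minimo_personas_alt secuencia
instance (secuencia : String) (out : Int) : Decidable (Spec_calcular_minimo_personas secuencia out) := by unfold Spec_calcular_minimo_personas; infer_instance

-- ===== CLAIM (what is proved, stated in full; the proofs are below) =====
def Claim_equal_calcular_minimo_personas : Prop := ∀ (secuencia : String), Dom_calcular_minimo_personas secuencia → Spec_calcular_minimo_personas secuencia (calcular_minimo_personas secuencia)

-- ===== LEMMAS AND PROOFS =====

def pvDelta (c : Char) : Int := if c = '+' then 1 else if c = '-' then -1 else 0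

-- the list of running prefix sums of the deltas of s, starting from total c
def pvPls (s : List Char) (c : Int) : List Int :=
  match s with
  | [] => []
  | ch :: t => (c + pvDelta ch) :: pvPls t (c + pvDelta ch)

def pvTot (s : List Char) : Int := (s.map pvDelta).sum

def pvBest (s : List Char) : Int := (pvPls s 0).foldl max 0

theorem pvFoldMaxMax (t : List Int) (a b : Int) :
    t.foldl max (max a b) = max a (t.foldl max b) := by
  induction t generalizing b with
  | nil => simp
  | cons x xs ih =>
    simp only [List.foldl]
    rw [max_assoc, ih]

-- A's fused loop equals folding max over the prefix-sum list, given the invariant c ≤ m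
theorem pvA_loop (s : List Char) (m c : Int) (h : c ≤ m) :
    (s.foldl pvStepA (m, c)).1 = (pvPls s c).foldl max m := by
  induction s generalizing m c with
  | nil => simp [pvPls]
  | cons ch t ih =>
    by_cases h1 : ch = '+'
    · simp only [List.foldl, pvPls, pvStepA, pvDelta, h1, ite_true]
      rw [ih (max m (c + 1)) (c + 1) (le_max_right _ _)]
    · by_cases h2 : ch = '-'
      · have e : c + (-1 : Int) = c - 1 := by ring
        have hne : ¬('-' : Char) = '+' := by decide
        simp only [List.foldl, pvPls, pvStepA, pvDelta, h2, if_neg hne, ite_true, e]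
        rw [ih m (c - 1) (by omega)]
        have hm : max m (c - 1) = m := by omega
        rw [hm]
      · simp only [List.foldl, pvPls, pvStepA, pvDelta, if_neg h1, if_neg h2, Int.add_zero]
        rw [ih m c h]
        have hm : max m c = m := by omega
        rw [hm]

theorem pvPls_shift (s : List Char) (c : Int) :
    pvPls s c = (pvPls s 0).map (c + ·) := by
  induction s generalizing c with
  | nil => simp [pvPls]
  | cons ch t ih =>
    simp only [pvPls, List.map]
    rw [ih (c + pvDelta ch), ih (0 + pvDelta ch)]
    simp [List.map_map]

theorem pvPls_append (a b : List Char) (c : Int) :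
    pvPls (a ++ b) c = pvPls a c ++ pvPls b (c + pvTot a) := by
  induction a generalizing c with
  | nil => simp [pvPls, pvTot]
  | cons ch t ih =>
    simp only [List.cons_append, pvPls, pvTot, List.map, List.sum_cons]
    rw [ih]
    have : c + pvDelta ch + pvTot t = c + (pvDelta ch + (t.map pvDelta).sum) := by
      simp [pvTot]; ring
    rw [this]

theorem pvMaxShift (xs : List Int) (t a : Int) :
    (xs.map (t + ·)).foldl max (t + a) = t + xs.foldl max a := by
  induction xs generalizing a with
  | nil => simp
  | cons x l ih =>
    simp only [List.map, List.foldl]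
    rw [← ih (max a x)]
    congr 1
    omega

theorem pvFoldMapMax (xs : List Int) (t M : Int) (h : t ≤ M) :
    (xs.map (t + ·)).foldl max M = max M (t + xs.foldl max 0) := by
  have hM : M = max M (t + 0) := by omega
  rw [hM, pvFoldMaxMax, pvMaxShift]
  omega

theorem pvBest_cons (ch : Char) (t : List Char) :
    pvBest (ch :: t) = max 0 (pvDelta ch + pvBest t) := by
  simp only [pvBest, pvPls, List.foldl, zero_add]
  rw [pvPls_shift t (pvDelta ch)]
  have h0 : max (0 : Int) (pvDelta ch) = max 0 (pvDelta ch + 0) := by omega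
  rw [h0, pvFoldMaxMax, pvMaxShift]

theorem pvTot_cons (ch : Char) (t : List Char) :
    pvTot (ch :: t) = pvDelta ch + pvTot t := by
  simp [pvTot]

theorem pvTot_le_best (s : List Char) : pvTot s ≤ pvBest s := by
  induction s with
  | nil => simp [pvTot, pvBest, pvPls]
  | cons ch t ih =>
    rw [pvTot_cons, pvBest_cons]
    omega

theorem pvBest_append (a b : List Char) :
    pvBest (a ++ b) = max (pvBest a) (pvTot a + pvBest b) := by
  simp only [pvBest, pvPls_append, List.foldl_append, zero_add]
  rw [pvPls_shift b (pvTot a)]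
  exact pvFoldMapMax _ _ _ (pvTot_le_best a)

theorem pvGo_spec_aux (n : Nat) : ∀ l : List Char, l.length ≤ n → pvGo l = (pvTot l, pvBest l) := by
  induction n with
  | zero =>
    intro l h
    have : l = [] := by cases l with | nil => rfl | cons a t => simp at h
    subst this
    simp [pvGo, pvTot, pvBest, pvPls]
  | succ n ih =>
    intro l h
    match l with
    | [] => simp [pvGo, pvTot, pvBest, pvPls]
    | [c] => simp [pvGo, pvTot, pvBest, pvPls, pvDelta]
    | c1 :: c2 :: rest =>
      rw [pvGo]
      have hlen : (c1 :: c2 :: rest).length = rest.length + 2 := by simp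
      have h1 : ((c1 :: c2 :: rest).take ((c1 :: c2 :: rest).length / 2)).length ≤ n := by
        simp only [List.length_take, hlen] at *
        omega
      have h2 : ((c1 :: c2 :: rest).drop ((c1 :: c2 :: rest).length / 2)).length ≤ n := by
        simp only [List.length_drop, hlen] at *
        omega
      rw [ih _ h1, ih _ h2]
      have hsplit := List.take_append_drop ((c1 :: c2 :: rest).length / 2) (c1 :: c2 :: rest)
      have htot : pvTot (c1 :: c2 :: rest) =
          pvTot ((c1 :: c2 :: rest).take ((c1 :: c2 :: rest).length / 2)) +
          pvTot ((c1 :: c2 :: rest).drop ((c1 :: c2 :: rest).length / 2)) := by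
        conv_lhs => rw [← hsplit]
        simp [pvTot]
      have hbest : pvBest (c1 :: c2 :: rest) =
          max (pvBest ((c1 :: c2 :: rest).take ((c1 :: c2 :: rest).length / 2)))
            (pvTot ((c1 :: c2 :: rest).take ((c1 :: c2 :: rest).length / 2)) +
              pvBest ((c1 :: c2 :: rest).drop ((c1 :: c2 :: rest).length / 2))) := by
        conv_lhs => rw [← hsplit]
        exact pvBest_append _ _
      rw [htot, hbest]

theorem pvGo_spec (l : List Char) : pvGo l = (pvTot l, pvBest l) :=
  pvGo_spec_aux l.length l le_rfl

theorem calcular_minimo_personas_eq (s : String) :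
    calcular_minimo_personas s = calcular_minimo_personas_alt s := by
  simp only [calcular_minimo_personas, calcular_minimo_personas_alt]
  rw [pvA_loop s.toList 0 0 le_rfl, pvGo_spec]
  simp only [pvBest]
  omega

-- ===== VERDICT (by name: the statement is the Claim_ definition above) =====
theorem calcular_minimo_personas_spec : Claim_equal_calcular_minimo_personas := by
  intro s _
  unfold Spec_calcular_minimo_personas
  exact calcular_minimo_personas_eq s
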